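-- pv_equiv track=rewrite | github.com/yonsweng/ps | codeforces/1616/a.py | solve
-- ===== SOURCE A (Python) =====
-- def solve(n, a):
--     answer = 0
--     h = {}
--     for ai in a:
--         h[abs(ai)] = h.get(abs(ai), 0) + 1
--     for ai, cnt in h.items():
--         if ai == 0:
--             answer += 1
--         else:
--             if cnt == 1:
--                 answer += 1
--             else:
--                 answer += 2
--     return answer
-- ===== SOURCE B (Python) =====
-- def solve(n, a):
--     bs = sorted(abs(x) for x in a)
--     ans = 0
--     prev1 = None
--     prev2 = None
--     for b in bs:
--         if prev1 is None or b != prev1: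
--             ans += 1
--         elif b != 0 and (prev2 is None or b != prev2):
--             ans += 1
--         prev2 = prev1
--         prev1 = b
--     return ans
-- ===== Notes on version B (the rewrite author's own statement) =====
-- stated objective: alternative
-- what changed: Replaces the frequency dictionary and its keyed second loop by sorting the absolute values and making one linear scan that compares each element with the two previous ones: a first occurrence (b != prev1) scores 1, a second occurrence of a nonzero value (b == prev1 != prev2, b != 0) scores 1 more.
import Mathlib
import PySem

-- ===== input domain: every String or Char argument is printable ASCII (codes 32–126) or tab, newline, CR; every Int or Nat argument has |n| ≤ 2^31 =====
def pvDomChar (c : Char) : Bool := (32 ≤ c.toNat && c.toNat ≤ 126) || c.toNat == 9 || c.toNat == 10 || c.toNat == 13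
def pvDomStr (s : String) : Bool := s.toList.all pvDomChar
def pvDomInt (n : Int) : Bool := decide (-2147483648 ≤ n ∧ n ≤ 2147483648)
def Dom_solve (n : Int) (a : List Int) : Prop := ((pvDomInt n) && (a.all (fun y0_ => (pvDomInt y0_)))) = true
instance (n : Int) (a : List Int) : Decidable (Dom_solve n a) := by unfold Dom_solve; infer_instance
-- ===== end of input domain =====

-- B sorts the absolute values and makes one linear scan comparing each element with the
-- two previous ones, instead of A's frequency dict plus keyed second loop (objective: alternative).

-- ===== PORT A =====
def solve (n : Int) (a : List Int) : Int :=
  let h : PySem.Dict Int Int :=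
    a.foldl (fun h ai => h.insert |ai| (h.getD |ai| 0 + 1)) PySem.Dict.empty
  h.items.foldl
    (fun answer p =>
      if p.1 = 0 then answer + 1
      else if p.2 = 1 then answer + 1
      else answer + 2) 0

-- ===== PORT B =====
-- the body of B's for-loop, as the step of the fold (state = (ans, prev1, prev2))
def bstep (st : Int × Option Int × Option Int) (b : Int) : Int × Option Int × Option Int :=
  (if st.2.1 = none ∨ st.2.1 ≠ some b then st.1 + 1
   else if b ≠ 0 ∧ (st.2.2 = none ∨ st.2.2 ≠ some b) then st.1 + 1
   else st.1,
   some b, st.2.1)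

def solve_alt (n : Int) (a : List Int) : Int :=
  let bs := PySem.List.sorted (a.map (fun x => |x|)) (fun x => x) false
  (bs.foldl bstep (0, none, none)).1

-- ===== PRECONDITION & SPEC =====
def Spec_solve (n : Int) (a : List Int) (out : Int) : Prop := out = solve_alt n a
instance (n : Int) (a : List Int) (out : Int) : Decidable (Spec_solve n a out) := by unfold Spec_solve; infer_instance

-- ===== CLAIM (what is proved, stated in full; the proofs are below) =====
def Claim_equal_solve : Prop := ∀ (n : Int) (a : List Int), Dom_solve n a → Spec_solve n a (solve n a)

-- ===== LEMMAS AND PROOFS =====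

-- the common value both programs compute: one per distinct |ai|, plus one per nonzero duplicated |ai|
def target (m : List Int) : Int :=
  ((PySem.Set.ofList m).length : Int) +
    (((PySem.Set.ofList m).countP (fun k => k != 0 && decide (2 ≤ m.count k))) : Int)

-- A's per-item contribution, as "1 + (1 if duplicated nonzero)".
theorem a_item_split (m : List Int) (k : Int) (hk : k ∈ m) :
    (if k = 0 then (1 : Int) else if (m.count k : Int) = 1 then 1 else 2) =
    1 + (if (k != 0 && decide (2 ≤ m.count k)) = true then (1 : Int) else 0) := by
  have hpos : 0 < m.count k := List.count_pos_iff.mpr hk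
  by_cases h0 : k = 0
  · simp [h0]
  · by_cases h1 : m.count k = 1
    · simp [h0, h1]
    · have h2 : 2 ≤ m.count k := by omega
      have hne : ((m.count k : Int)) ≠ 1 := by exact_mod_cast h1
      simp [h0, hne, h2]

-- a 1/0-weighted sum over a distinct list is length + countP
theorem sum_one_plus_ite (S : List Int) (p : Int → Bool) :
    (S.map (fun k => 1 + (if p k = true then (1 : Int) else 0))).sum =
      (S.length : Int) + (S.countP p : Int) := by
  have hsplit : (S.map (fun k => 1 + (if p k = true then (1 : Int) else 0))).sum =
      (S.map (fun _ => (1 : Int))).sum +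
      (S.map (fun k => if p k = true then (1 : Int) else 0)).sum := by
    induction S with
    | nil => simp
    | cons y ys ihy => simp only [List.map_cons, List.sum_cons, ihy] <;> try ring
  rw [hsplit, PySem.List.sum_map_ite_one_zero p S]
  simp

-- A computes target of the list of absolute values
theorem a_char (n : Int) (a : List Int) : solve n a = target (a.map (fun x => |x|)) := by
  have hA : (a.foldl (fun h ai => h.insert |ai| (h.getD |ai| 0 + 1))
      (PySem.Dict.empty : PySem.Dict Int Int)) =
      PySem.Dict.counter (a.map (fun ai => |ai|)) := by
    rw [← PySem.Dict.foldl_insert_getD_add_one_eq_counter, List.foldl_map]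
  show (a.foldl (fun h ai => h.insert |ai| (h.getD |ai| 0 + 1))
      (PySem.Dict.empty : PySem.Dict Int Int)).items.foldl
        (fun answer p =>
          if p.1 = 0 then answer + 1
          else if p.2 = 1 then answer + 1
          else answer + 2) 0 = _
  rw [hA, PySem.Dict.items_counter]
  set m : List Int := a.map (fun ai => |ai|) with hm
  set S := PySem.Set.ofList m with hS
  set p : Int → Bool := fun k => k != 0 && decide (2 ≤ m.count k) with hp
  have hfun : (fun (answer : Int) (q : Int × Int) =>
      if q.1 = 0 then answer + 1 else if q.2 = 1 then answer + 1 else answer + 2) =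
      (fun answer q => answer + (if q.1 = 0 then 1 else if q.2 = 1 then 1 else 2)) := by
    funext answer q; split_ifs <;> ring
  rw [hfun, PySem.List.foldl_add, List.map_map]
  have hcong : S.map ((fun q : Int × Int =>
      if q.1 = 0 then (1 : Int) else if q.2 = 1 then 1 else 2) ∘
      (fun k => (k, (m.count k : Int)))) =
      S.map (fun k => 1 + (if p k = true then (1 : Int) else 0)) := by
    apply List.map_congr_left
    intro k hk
    have hkm : k ∈ m := by
      rw [hS] at hk; simpa [PySem.Set.mem_ofList] using hk
    simpa [hp] using a_item_split m k hkm
  rw [hcong, sum_one_plus_ite]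
  simp [target, hS, hp]

-- for a distinct list b ∈ s, a sum where f and g differ only at b
theorem sum_map_diff_single (s : List Int) (f g : Int → Int) (b : Int)
    (hb : b ∈ s) (hnd : s.Nodup) (h : ∀ x ∈ s, x ≠ b → f x = g x) :
    (s.map f).sum = (s.map g).sum + (f b - g b) := by
  induction s with
  | nil => simp at hb
  | cons y ys ih =>
    by_cases hyb : y = b
    · subst hyb
      have hny : y ∉ ys := (List.nodup_cons.mp hnd).1
      have : ys.map f = ys.map g := by
        apply List.map_congr_left
        intro x hx
        exact h x (List.mem_cons_of_mem _ hx) (fun hxy => hny (hxy ▸ hx))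
      simp only [List.map_cons, List.sum_cons, this] <;> try ring
    · have hbys : b ∈ ys := by
        rcases List.mem_cons.mp hb with h' | h'
        · exact absurd h'.symm hyb
        · exact h'
      have := ih hbys (List.nodup_cons.mp hnd).2
        (fun x hx => h x (List.mem_cons_of_mem _ hx))
      simp only [List.map_cons, List.sum_cons, this,
        h y (List.mem_cons_self) hyb]
      ring

-- per-value contribution of B's scan, given the last two scanned values
def contrib (cnt : Int → Nat) (p1 p2 : Option Int) (x : Int) : Int :=
  if p1 ≠ some x then 1 + (if x ≠ 0 ∧ 2 ≤ cnt x then 1 else 0)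
  else if p2 ≠ some x then (if x ≠ 0 then 1 else 0)
  else 0

-- B's fold over a sorted tail l, started after having scanned p1 (then p2)
theorem bfold (l : List Int) (ans : Int) (p1 p2 : Option Int)
    (hs : l.Pairwise (· ≤ ·))
    (h1 : ∀ x ∈ l, ∀ v, p1 = some v → v ≤ x) :
    (l.foldl bstep (ans, p1, p2)).1
      = ans + ((PySem.Set.ofList l).map (contrib l.count p1 p2)).sum := by
  induction l generalizing ans p1 p2 with
  | nil => simp [PySem.Set.ofList]
  | cons b t ih =>
    obtain ⟨hb, ht⟩ := List.pairwise_cons.mp hs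
    have hstep : bstep (ans, p1, p2) b =
        ((if p1 = none ∨ p1 ≠ some b then ans + 1
          else if b ≠ 0 ∧ (p2 = none ∨ p2 ≠ some b) then ans + 1
          else ans), some b, p1) := rfl
    rw [List.foldl_cons, hstep,
      ih _ (some b) p1 ht (by rintro x hx v ⟨rfl⟩; exact hb x hx)]
    set ans' := (if p1 = none ∨ p1 ≠ some b then ans + 1
          else if b ≠ 0 ∧ (p2 = none ∨ p2 ≠ some b) then ans + 1
          else ans) with hans'
    -- pointwise agreement away from b
    have hpt : ∀ x ∈ PySem.Set.ofList t, x ≠ b →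
        contrib t.count (some b) p1 x = contrib (b :: t).count p1 p2 x := by
      intro x hx hxb
      have hxt : x ∈ t := (PySem.Set.mem_ofList t x).mp hx
      have hbx : b ≤ x := hb x hxt
      have hp1x : p1 ≠ some x := by
        rintro rfl
        have hvb : x ≤ b := h1 b List.mem_cons_self x rfl
        exact hxb (le_antisymm hvb hbx)
      have hcnt : (b :: t).count x = t.count x :=
        List.count_cons_of_ne (Ne.symm hxb)
      have hbx' : b ≠ x := fun h => hxb h.symm
      simp [contrib, hp1x, hxb, hbx', hcnt]
    by_cases hbt : b ∈ t
    · -- distinct sets of b::t and t coincide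
      have hmem : ∀ x, x ∈ PySem.Set.ofList (b :: t) ↔ x ∈ PySem.Set.ofList t := by
        intro x
        simp only [PySem.Set.mem_ofList, List.mem_cons]
        constructor
        · rintro (rfl | h); exacts [hbt, h]
        · exact Or.inr
      have hperm : (PySem.Set.ofList (b :: t)).Perm (PySem.Set.ofList t) :=
        (List.perm_ext_iff_of_nodup (PySem.Set.nodup_ofList _)
          (PySem.Set.nodup_ofList _)).mpr hmem
      rw [(hperm.map (contrib (b :: t).count p1 p2)).sum_eq]
      have hbS : b ∈ PySem.Set.ofList t := (PySem.Set.mem_ofList t b).mpr hbt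
      rw [sum_map_diff_single _ _ _ b hbS (PySem.Set.nodup_ofList _) hpt]
      -- it remains to balance the step at b
      have hcntb : 2 ≤ (b :: t).count b := by
        have : 0 < t.count b := List.count_pos_iff.mpr hbt
        rw [List.count_cons_self]; omega
      rw [hans']
      by_cases hp1 : p1 = some b
      · by_cases hp2 : p2 = some b
        · simp [contrib, hp1, hp2] <;> try ring
        · have hz : (p2 = none ∨ p2 ≠ some b) ↔ True := by
            constructor
            · intro _; trivial
            · intro _
              cases p2 with
              | none => exact Or.inl rfl
              | some v => exact Or.inr (fun h => hp2 h)
          by_cases hb0 : b = 0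
          · simp [contrib, hp1, hp2, hb0] <;> try ring
          · simp [contrib, hp1, hp2, hb0, hz, hcntb] <;> try ring
      · have hc1 : p1 = none ∨ p1 ≠ some b := by
          cases p1 with
          | none => exact Or.inl rfl
          | some v => exact Or.inr (fun h => hp1 h)
        by_cases hb0 : b = 0
        · subst hb0
          simp [contrib, hp1, hc1, hbt] <;> try ring
        · simp [contrib, hp1, hc1, hb0, hbt, hcntb] <;> try ring
    · -- b is new: the distinct set gains b in front
      have hmem : ∀ x, x ∈ PySem.Set.ofList (b :: t) ↔ x ∈ b :: PySem.Set.ofList t := by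
        intro x
        simp [PySem.Set.mem_ofList, List.mem_cons]
      have hnd2 : (b :: PySem.Set.ofList t).Nodup := by
        rw [List.nodup_cons]
        exact ⟨fun h => hbt ((PySem.Set.mem_ofList t b).mp h), PySem.Set.nodup_ofList _⟩
      have hperm : (PySem.Set.ofList (b :: t)).Perm (b :: PySem.Set.ofList t) :=
        (List.perm_ext_iff_of_nodup (PySem.Set.nodup_ofList _) hnd2).mpr hmem
      rw [(hperm.map (contrib (b :: t).count p1 p2)).sum_eq]
      have hcong : (PySem.Set.ofList t).map (contrib (b :: t).count p1 p2) =
          (PySem.Set.ofList t).map (contrib t.count (some b) p1) := by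
        apply List.map_congr_left
        intro x hx
        have hxt : x ∈ t := (PySem.Set.mem_ofList t x).mp hx
        exact (hpt x hx (fun h => hbt (h ▸ hxt))).symm
      have hcntb : (b :: t).count b = 1 := by
        rw [List.count_cons_self, List.count_eq_zero_of_not_mem hbt]
      rw [List.map_cons, List.sum_cons, hcong, hans']
      by_cases hp1 : p1 = some b
      · by_cases hp2 : p2 = some b
        · simp [contrib, hp1, hp2] <;> try ring
        · have hz : (p2 = none ∨ p2 ≠ some b) ↔ True := by
            constructor
            · intro _; trivial
            · intro _
              cases p2 with
              | none => exact Or.inl rfl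
              | some v => exact Or.inr (fun h => hp2 h)
          by_cases hb0 : b = 0
          · simp [contrib, hp1, hp2, hb0] <;> try ring
          · simp [contrib, hp1, hp2, hb0, hz] <;> try ring
      · have hc1 : p1 = none ∨ p1 ≠ some b := by
          cases p1 with
          | none => exact Or.inl rfl
          | some v => exact Or.inr (fun h => hp1 h)
        simp [contrib, hp1, hc1, hcntb] <;> try ring

-- B computes target of the list of absolute values
theorem b_char (n : Int) (a : List Int) : solve_alt n a = target (a.map (fun x => |x|)) := by
  show ((PySem.List.sorted (a.map (fun x => |x|)) (fun x => x) false).foldl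
      bstep (0, none, none)).1 = _
  set m : List Int := a.map (fun x => |x|) with hm
  set bs := PySem.List.sorted m (fun x => x) false with hbs
  have hsort : bs.Pairwise (· ≤ ·) := by
    have := PySem.List.sorted_pairwise m (fun x => x)
    simpa using this
  rw [bfold bs 0 none none hsort (by rintro x hx v ⟨⟩)]
  have hnone : ∀ x : Int, (none : Option Int) ≠ some x := by intro x h; cases h
  have hcong : (PySem.Set.ofList bs).map (contrib bs.count none none) =
      (PySem.Set.ofList bs).map
        (fun k => 1 + (if (fun k => k != 0 && decide (2 ≤ bs.count k)) k = true
          then (1 : Int) else 0)) := by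
    apply List.map_congr_left
    intro x hx
    simp only [contrib, hnone x, ne_eq, not_false_iff, if_true, if_pos,
      Bool.and_eq_true, bne_iff_ne, decide_eq_true_eq]
  rw [hcong, sum_one_plus_ite, zero_add]
  -- transfer from bs (the sorted list) back to m
  have hperm : bs.Perm m := PySem.List.sorted_perm m (fun x => x) false
  have hmemS : ∀ x, x ∈ PySem.Set.ofList bs ↔ x ∈ PySem.Set.ofList m := by
    intro x
    simp only [PySem.Set.mem_ofList]
    exact ⟨fun h => hperm.mem_iff.mp h, fun h => hperm.mem_iff.mpr h⟩
  have hpermS : (PySem.Set.ofList bs).Perm (PySem.Set.ofList m) :=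
    (List.perm_ext_iff_of_nodup (PySem.Set.nodup_ofList _)
      (PySem.Set.nodup_ofList _)).mpr hmemS
  have hcnt : (fun k => k != 0 && decide (2 ≤ bs.count k)) =
      (fun k => k != 0 && decide (2 ≤ m.count k)) := by
    funext k; rw [hperm.count_eq]
  rw [hcnt, hpermS.countP_eq, hpermS.length_eq]
  rfl

-- ===== VERDICT (by name: the statement is the Claim_ definition above) =====
theorem solve_spec : Claim_equal_solve := by
  intro n a _
  unfold Spec_solve
  rw [a_char, b_char]
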